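-- pv_equiv track=rewrite | github.com/alexpovel/headson | tests/fixtures/code/sample.py | compute
-- ===== SOURCE A (Python) =====
-- def compute(n: int) -> int:
--     total = 0
--     for i in range(n):
--         if i % 2 == 0:
--             total += i
--         else:
--             total += i * 2
--     return total
-- ===== SOURCE B (Python) =====
-- def compute(n: int) -> int:
--     if n <= 0:
--         return 0
--     half = n // 2
--     return n * (n - 1) // 2 + half * half
-- ===== Notes on version B (the rewrite author's own statement) =====
-- stated objective: faster
-- what changed: Replaced the O(n) loop over range(n) by constant-time closed-form arithmetic: the Gauss sum of all indices plus the square of the number of odd indices.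
import Mathlib
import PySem

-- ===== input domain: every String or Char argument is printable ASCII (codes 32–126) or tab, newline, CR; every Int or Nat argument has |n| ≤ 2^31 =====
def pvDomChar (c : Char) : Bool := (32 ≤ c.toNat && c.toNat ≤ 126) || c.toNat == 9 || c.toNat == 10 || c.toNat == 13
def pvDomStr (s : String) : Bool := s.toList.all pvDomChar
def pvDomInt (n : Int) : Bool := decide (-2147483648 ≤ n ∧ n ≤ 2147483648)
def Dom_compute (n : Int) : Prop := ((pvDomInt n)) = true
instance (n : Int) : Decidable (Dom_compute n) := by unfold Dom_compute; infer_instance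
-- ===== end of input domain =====

-- B replaces A's O(n) loop by the closed form n(n-1)//2 + (n//2)**2 (objective: faster).

-- ===== PORT A =====
def compute (n : Int) : Int :=
  (PySem.List.pyRange 0 n 1).foldl
    (fun total i => if PySem.Int.mod i 2 == 0 then total + i else total + i * 2) 0

-- ===== PORT B =====
def compute_alt (n : Int) : Int :=
  if n ≤ 0 then 0
  else
    PySem.Int.floordiv (n * (n - 1)) 2
      + PySem.Int.floordiv n 2 * PySem.Int.floordiv n 2

-- ===== PRECONDITION & SPEC =====
def Spec_compute (n : Int) (out : Int) : Prop := out = compute_alt n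
instance (n : Int) (out : Int) : Decidable (Spec_compute n out) := by unfold Spec_compute; infer_instance

-- ===== CLAIM (what is proved, stated in full; the proofs are below) =====
def Claim_equal_compute : Prop := ∀ (n : Int), Dom_compute n → Spec_compute n (compute n)

-- ===== LEMMAS AND PROOFS =====

-- A's loop body
def pvStep (total i : Int) : Int :=
  if PySem.Int.mod i 2 == 0 then total + i else total + i * 2

-- A's fold over range m
def pvFold (m : Nat) : Int :=
  ((List.range m).map (fun k : Nat => (0:Int) + (k:Int))).foldl pvStep 0

lemma pvFold_succ (m : Nat) : pvFold (m + 1) = pvStep (pvFold m) ((0:Int) + (m:Int)) := by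
  simp [pvFold, List.range_succ]

lemma pvStep_of_even (t i : Int) (h : i % 2 = 0) : pvStep t i = t + i := by
  unfold pvStep
  rw [PySem.Int.mod_eq_emod_of_pos (by norm_num), h]
  simp

lemma pvStep_of_odd (t i : Int) (h : i % 2 = 1) : pvStep t i = t + i * 2 := by
  unfold pvStep
  rw [PySem.Int.mod_eq_emod_of_pos (by norm_num), h]
  simp

lemma pvFold_even (q : Nat) : pvFold (q + q) = 3 * (q:Int) * q - q := by
  induction q with
  | zero => simp [pvFold]
  | succ q ih =>
    rw [show q + 1 + (q + 1) = q + q + 1 + 1 from by omega, pvFold_succ, pvFold_succ, ih,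
        pvStep_of_odd _ _ (by push_cast; omega), pvStep_of_even _ _ (by push_cast; omega)]
    push_cast
    ring

lemma pvFold_odd (q : Nat) : pvFold (2 * q + 1) = 3 * (q:Int) * q + q := by
  rw [show 2 * q + 1 = q + q + 1 from by omega, pvFold_succ, pvFold_even,
      pvStep_of_even _ _ (by push_cast; omega)]
  push_cast
  ring

-- ===== VERDICT (by name: the statement is the Claim_ definition above) =====
theorem compute_spec : Claim_equal_compute := by
  intro n _
  unfold Spec_compute compute compute_alt
  rw [PySem.List.pyRange_one]
  by_cases hn : n ≤ 0
  · have h0 : (n - 0).toNat = 0 := by omega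
    rw [h0]
    simp [hn]
  · rw [if_neg hn]
    show pvFold (n - 0).toNat = _
    have hm : (((n - 0).toNat : Nat) : Int) = n := by omega
    rcases Nat.even_or_odd (n - 0).toNat with ⟨q, hq⟩ | ⟨q, hq⟩
    · have hn2 : n = (q:Int) + q := by rw [← hm, hq]; push_cast; ring
      have e1 : PySem.Int.floordiv (n * (n - 1)) 2 = (q:Int) * (n - 1) := by
        rw [PySem.Int.floordiv_eq_ediv_of_pos (by norm_num),
            show n * (n - 1) = 2 * ((q:Int) * (n - 1)) from by rw [hn2]; ring]
        exact Int.mul_ediv_cancel_left _ (by norm_num)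
      have e2 : PySem.Int.floordiv n 2 = (q:Int) := by
        rw [PySem.Int.floordiv_eq_ediv_of_pos (by norm_num)]; omega
      rw [hq, pvFold_even, e1, e2, hn2]
      ring
    · have hn2 : n = 2 * (q:Int) + 1 := by rw [← hm, hq]; push_cast; ring
      have e1 : PySem.Int.floordiv (n * (n - 1)) 2 = n * (q:Int) := by
        rw [PySem.Int.floordiv_eq_ediv_of_pos (by norm_num),
            show n * (n - 1) = 2 * (n * (q:Int)) from by rw [hn2]; ring]
        exact Int.mul_ediv_cancel_left _ (by norm_num)
      have e2 : PySem.Int.floordiv n 2 = (q:Int) := by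
        rw [PySem.Int.floordiv_eq_ediv_of_pos (by norm_num)]; omega
      rw [hq, pvFold_odd, e1, e2, hn2]
      ring
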